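-- pv_equiv track=rewrite | github.com/SzymonIwaniuk/wdi-2024-2025 | Zestaw2/79.py | spojny
-- ===== SOURCE A (Python) =====
-- def arePrimes(iloczyn):#Funkcja sprawdza czy w iloczynie wystepuje kazdy czynnik pierwszy
--     i = 2               #dokladnie raz jezeli nie zwraca False
--     while iloczyn > 1:
--         cnt = 0
--         while iloczyn % i == 0:
--             cnt += 1
--             iloczyn //= i
--         if cnt > 1:
--             return False
--         i += 1
--
--     return True
--
-- def spojny(T):
--     N = len(T)
--     maxi = cnt = 0
--     iloczyn = 1
--     for i in range(N):#przechodze po kazdym elemencie tablicy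
--         iloczyn *= T[i]
--         if arePrimes(iloczyn): #jezeli arePrimes == True zwiekszam cnt
--                 cnt += 1
--         else:
--             maxi = max(maxi, cnt) # jezeli nie: cnt przypisz 0, iloczyn przypisz 1 -
--             cnt = 0               # przechodze do nastpnego elementu i sprawdzam dalej
--             iloczyn = 1
--         maxi = max(maxi, cnt)         #edge case gdy elementy podciagu bylyby na ostatnim miejscu w tablicy
--     return maxi
-- ===== SOURCE B (Python) =====
-- def _squarefree(p):
--     # p is squarefree (each prime factor occurs at most once); True for p <= 1.
--     d = 2
--     while d * d <= p:
--         if p % d == 0: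
--             p //= d
--             if p % d == 0:
--                 return False
--         d += 1
--     return True
--
-- def spojny(T):
--     best = run = 0
--     prod = 1
--     for x in T:
--         prod *= x
--         if _squarefree(prod):
--             run += 1
--         else:
--             run = 0
--             prod = 1
--         if run > best:
--             best = run
--     return best
-- ===== Notes on version B (the rewrite author's own statement) =====
-- stated objective: faster
-- what changed: A's squarefree test factors the running product completely by trial division up to its largest prime factor (counting multiplicities); B instead stops at sqrt(product), dividing each found divisor out once and failing as soon as a divisor divides twice, which is correct because after removing all factors below sqrt(p) at most one prime remains.
import Mathlib
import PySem

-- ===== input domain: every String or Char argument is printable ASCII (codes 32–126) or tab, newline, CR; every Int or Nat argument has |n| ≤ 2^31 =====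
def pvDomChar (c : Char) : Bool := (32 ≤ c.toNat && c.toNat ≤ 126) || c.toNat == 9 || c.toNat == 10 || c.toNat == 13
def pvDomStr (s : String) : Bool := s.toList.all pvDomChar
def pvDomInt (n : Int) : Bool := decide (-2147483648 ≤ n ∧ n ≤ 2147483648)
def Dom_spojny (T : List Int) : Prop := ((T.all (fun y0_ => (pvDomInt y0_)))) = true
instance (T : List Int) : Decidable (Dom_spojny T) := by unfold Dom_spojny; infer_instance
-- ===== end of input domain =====

-- B replaces A's full trial-division factorisation of the running product (divisors up to the
-- largest prime factor) by a square-divisor check that stops at √product; the scan is otherwise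
-- the same exact behaviour.

-- ===== PORT A =====
-- inner while: 'while iloczyn % i == 0: cnt += 1; iloczyn //= i' (fuel only makes it total)
def aInner : Nat → Int → Int → Int → Int × Int
  | 0, n, _, cnt => (n, cnt)
  | f + 1, n, i, cnt =>
    if PySem.Int.mod n i = 0 then aInner f (PySem.Int.floordiv n i) i (cnt + 1)
    else (n, cnt)

-- outer while of arePrimes (fuel only makes it total; never exhausted on the calls made)
def aOuter : Nat → Int → Int → Bool
  | 0, _, _ => true
  | f + 1, n, i =>
    if n > 1 then
      let r := aInner n.toNat n i 0
      if r.2 > 1 then false else aOuter f r.1 (i + 1)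
    else true

def arePrimes (iloczyn : Int) : Bool := aOuter (iloczyn.toNat + 1) iloczyn 2

-- 'for i in range(N)' over the state (maxi, cnt, iloczyn)
def aGo : List Int → Int → Int → Int → Int
  | [], maxi, _, _ => maxi
  | x :: xs, maxi, cnt, prod =>
    let p := prod * x
    if arePrimes p then aGo xs (max maxi (cnt + 1)) (cnt + 1) p
    else aGo xs (max (max maxi cnt) 0) 0 1

def spojny (T : List Int) : Int := aGo T 0 0 1

-- ===== PORT B =====
-- B's while: 'while d*d <= p: if p % d == 0: p //= d; if p % d == 0: return False; d += 1'
def bLoop : Nat → Int → Int → Bool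
  | 0, _, _ => true
  | f + 1, p, d =>
    if d * d ≤ p then
      if PySem.Int.mod p d = 0 then
        let p' := PySem.Int.floordiv p d
        if PySem.Int.mod p' d = 0 then false else bLoop f p' (d + 1)
      else bLoop f p (d + 1)
    else true

def squarefreeB (p : Int) : Bool := bLoop (p.toNat + 1) p 2

def altGo : List Int → Int → Int → Int → Int
  | [], best, _, _ => best
  | x :: xs, best, run, prod =>
    let p := prod * x
    if squarefreeB p then
      altGo xs (if run + 1 > best then run + 1 else best) (run + 1) p
    else
      altGo xs (if (0 : Int) > best then 0 else best) 0 1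

def spojny_alt (T : List Int) : Int := altGo T 0 0 1

-- ===== PRECONDITION & SPEC =====
def Spec_spojny (T : List Int) (out : Int) : Prop := out = spojny_alt T
instance (T : List Int) (out : Int) : Decidable (Spec_spojny T out) := by unfold Spec_spojny; infer_instance

-- ===== CLAIM (what is proved, stated in full; the proofs are below) =====
def Claim_equal_spojny : Prop := ∀ (T : List Int), Dom_spojny T → Spec_spojny T (spojny T)

-- ===== LEMMAS AND PROOFS =====

-- inner loop: divisor does not divide → state unchanged
theorem aInner_not_dvd (f : Nat) (n i c : Int) (h : ¬ i ∣ n) :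
    aInner (f + 1) n i c = (n, c) := by
  simp [aInner, (PySem.Int.mod_eq_zero_iff_dvd n i).not.mpr h]

-- inner loop: cnt only grows
theorem aInner_snd_ge (f : Nat) (n i c : Int) : c ≤ (aInner f n i c).2 := by
  induction f generalizing n c with
  | zero => simp [aInner]
  | succ f ih =>
    simp only [aInner]
    split
    · exact le_trans (by omega) (ih _ _)
    · simp

theorem aInner_once (f : Nat) (n i c : Int) (h1 : i ∣ n) (h2 : ¬ i ∣ PySem.Int.floordiv n i) :
    aInner (f + 2) n i c = (PySem.Int.floordiv n i, c + 1) := by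
  have e1 : aInner (f + 2) n i c = aInner (f + 1) (PySem.Int.floordiv n i) i (c + 1) := by
    simp [aInner, (PySem.Int.mod_eq_zero_iff_dvd n i).mpr h1]
  rw [e1, aInner_not_dvd f _ i _ h2]

theorem aInner_twice (f : Nat) (n i c : Int) (hc : 0 ≤ c) (h1 : i ∣ n)
    (h2 : i ∣ PySem.Int.floordiv n i) :
    1 < (aInner (f + 2) n i c).2 := by
  have e1 : aInner (f + 2) n i c = aInner (f + 1) (PySem.Int.floordiv n i) i (c + 1) := by
    simp [aInner, (PySem.Int.mod_eq_zero_iff_dvd n i).mpr h1]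
  have e2 : aInner (f + 1) (PySem.Int.floordiv n i) i (c + 1)
      = aInner f (PySem.Int.floordiv (PySem.Int.floordiv n i) i) i (c + 1 + 1) := by
    simp [aInner, (PySem.Int.mod_eq_zero_iff_dvd _ i).mpr h2]
  rw [e1, e2]
  have := aInner_snd_ge f (PySem.Int.floordiv (PySem.Int.floordiv n i) i) i (c + 1 + 1)
  omega

-- loops that are over: A with p ≤ 1, B with p < d*d
theorem aOuter_le_one (f : Nat) (n i : Int) (h : ¬ n > 1) : aOuter f n i = true := by
  cases f <;> simp [aOuter, h]

theorem bLoop_small (f : Nat) (p d : Int) (h : ¬ d * d ≤ p) : bLoop f p d = true := by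
  cases f <;> simp [bLoop, h]

-- A's outer loop returns true once all remaining factors are ≥ i and p < i²
theorem aOuter_true (fA : Nat) (p i : Int) (hp : 1 ≤ p) (hi : 2 ≤ i)
    (hinv : ∀ j : Int, 2 ≤ j → j < i → ¬ j ∣ p) (hlt : p < i * i)
    (hfA : p + 2 ≤ (fA : Int) + i) : aOuter fA p i = true := by
  induction fA generalizing p i with
  | zero => simp [aOuter]
  | succ f ih =>
    by_cases hp2 : p > 1
    · have hpt : ((p.toNat : Int)) = p := Int.toNat_of_nonneg (by omega)
      by_cases hd : i ∣ p
      · -- p has a factor i but p < i*i and no smaller factor: p = i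
        have hfd : PySem.Int.floordiv p i = p / i := PySem.Int.floordiv_eq_ediv_of_pos (by omega)
        have hip : i ≤ p := Int.le_of_dvd (by omega) hd
        have hq1 : 1 ≤ p / i := by rw [Int.le_ediv_iff_mul_le (by omega)]; omega
        have hq2 : p / i < i := by rw [Int.ediv_lt_iff_lt_mul (by omega)]; exact hlt
        have hqdvd : p / i ∣ p := ⟨i, (Int.ediv_mul_cancel hd).symm⟩
        have hq : p / i = 1 := by
          by_contra hne
          exact hinv (p / i) (by omega) hq2 hqdvd
        have hpi : p = i := by
          have := Int.ediv_mul_cancel hd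
          rw [hq] at this; omega
        obtain ⟨k, hk⟩ : ∃ k, p.toNat = k + 2 := ⟨p.toNat - 2, by omega⟩
        have hnd1 : ¬ i ∣ PySem.Int.floordiv p i := by
          rw [hfd, hq]; intro h; have := Int.le_of_dvd one_pos h; omega
        have hinner : aInner p.toNat p i 0 = (PySem.Int.floordiv p i, 1) := by
          rw [hk]; simpa using aInner_once k p i 0 hd hnd1
        simp only [aOuter, if_pos hp2, hinner]
        norm_num
        exact aOuter_le_one f _ _ (by rw [hfd, hq]; omega)
      · obtain ⟨k, hk⟩ : ∃ k, p.toNat = k + 1 := ⟨p.toNat - 1, by omega⟩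
        have hinner : aInner p.toNat p i 0 = (p, 0) := by
          rw [hk]; exact aInner_not_dvd k p i 0 hd
        simp only [aOuter, if_pos hp2, hinner]
        norm_num
        exact ih p (i + 1) hp (by omega)
          (fun j h2 hj hdvd => by
            rcases lt_or_eq_of_le (by omega : j ≤ i) with h | h
            · exact hinv j h2 h hdvd
            · exact hd (h ▸ hdvd))
          (by nlinarith) (by push_cast at hfA ⊢; omega)
    · exact aOuter_le_one _ _ _ hp2

-- main simulation lemma: A's full factorisation loop agrees with B's √-bounded loop
theorem aOuter_eq_bLoop (fA fB : Nat) (p i : Int) (hp : 1 ≤ p) (hi : 2 ≤ i)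
    (hinv : ∀ j : Int, 2 ≤ j → j < i → ¬ j ∣ p)
    (hfA : p + 2 ≤ (fA : Int) + i) (hfB : p + 2 ≤ (fB : Int) + i) :
    aOuter fA p i = bLoop fB p i := by
  induction fA generalizing fB p i with
  | zero =>
    have hp1 : p = 1 := by
      by_contra hne
      exact hinv p (by omega) (by push_cast at hfA; omega) dvd_rfl
    rw [aOuter_le_one 0 p i (by omega), bLoop_small fB p i (by nlinarith)]
  | succ f ih =>
    by_cases hp2 : p > 1
    · by_cases hcond : i * i ≤ p
      · have h2i : 2 * i ≤ p := by nlinarith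
        obtain ⟨fB', rfl⟩ : ∃ k, fB = k + 1 := ⟨fB - 1, by omega⟩
        have hpt : ((p.toNat : Int)) = p := Int.toNat_of_nonneg (by omega)
        have hfd : PySem.Int.floordiv p i = p / i := PySem.Int.floordiv_eq_ediv_of_pos (by omega)
        by_cases hd : i ∣ p
        · have hmod0 : PySem.Int.mod p i = 0 := (PySem.Int.mod_eq_zero_iff_dvd p i).mpr hd
          by_cases hd2 : i ∣ PySem.Int.floordiv p i
          · -- i² divides p: both return false
            obtain ⟨k, hk⟩ : ∃ k, p.toNat = k + 2 := ⟨p.toNat - 2, by omega⟩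
            have hcnt : 1 < (aInner p.toNat p i 0).2 := by
              rw [hk]; exact aInner_twice k p i 0 le_rfl hd hd2
            have hmod2 : PySem.Int.mod (PySem.Int.floordiv p i) i = 0 :=
              (PySem.Int.mod_eq_zero_iff_dvd _ i).mpr hd2
            simp only [aOuter, if_pos hp2, bLoop, if_pos hcond, hmod0, hmod2]
            simp [hcnt]
          · -- i divides p exactly once: both divide out i and move on
            obtain ⟨k, hk⟩ : ∃ k, p.toNat = k + 2 := ⟨p.toNat - 2, by omega⟩
            have hinner : aInner p.toNat p i 0 = (PySem.Int.floordiv p i, 1) := by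
              rw [hk]; simpa using aInner_once k p i 0 hd hd2
            have hmod2 : PySem.Int.mod (PySem.Int.floordiv p i) i ≠ 0 :=
              fun h => hd2 ((PySem.Int.mod_eq_zero_iff_dvd _ i).mp h)
            have hqdvd : p / i ∣ p := ⟨i, (Int.ediv_mul_cancel hd).symm⟩
            have hq1 : 1 ≤ p / i := by
              rw [Int.le_ediv_iff_mul_le (by omega)]
              have := Int.le_of_dvd (by omega) hd; omega
            have hqle : p / i ≤ p := Int.ediv_le_self i (by omega : (0:Int) ≤ p)
            simp only [aOuter, if_pos hp2, hinner, bLoop, if_pos hcond, hmod0]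
            simp [hmod2]
            rw [hfd]
            exact ih fB' (p / i) (i + 1) hq1 (by omega)
              (fun j h2 hj hdvd => by
                rcases lt_or_eq_of_le (by omega : j ≤ i) with h | h
                · exact hinv j h2 h (hdvd.trans hqdvd)
                · exact hd2 (by rw [hfd]; exact h ▸ hdvd))
              (by push_cast at hfA ⊢; omega) (by push_cast at hfB ⊢; omega)
        · have hmod0 : PySem.Int.mod p i ≠ 0 :=
            fun h => hd ((PySem.Int.mod_eq_zero_iff_dvd p i).mp h)
          obtain ⟨k, hk⟩ : ∃ k, p.toNat = k + 1 := ⟨p.toNat - 1, by omega⟩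
          have hinner : aInner p.toNat p i 0 = (p, 0) := by
            rw [hk]; exact aInner_not_dvd k p i 0 hd
          simp only [aOuter, if_pos hp2, hinner, bLoop, if_pos hcond, if_neg hmod0]
          norm_num
          exact ih fB' p (i + 1) (by omega) (by omega)
            (fun j h2 hj hdvd => by
              rcases lt_or_eq_of_le (by omega : j ≤ i) with h | h
              · exact hinv j h2 h hdvd
              · exact hd (h ▸ hdvd))
            (by push_cast at hfA ⊢; omega) (by push_cast at hfB ⊢; omega)
      · rw [aOuter_true (f + 1) p i hp hi hinv (by omega) hfA, bLoop_small fB p i hcond]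
    · rw [aOuter_le_one _ _ _ hp2, bLoop_small fB p i (by nlinarith)]

theorem arePrimes_eq (p : Int) : arePrimes p = squarefreeB p := by
  unfold arePrimes squarefreeB
  by_cases hp2 : p > 1
  · have hpt : ((p.toNat : Int)) = p := Int.toNat_of_nonneg (by omega)
    exact aOuter_eq_bLoop (p.toNat + 1) (p.toNat + 1) p 2 (by omega) le_rfl
      (fun j h2 hj _ => absurd (lt_of_lt_of_le hj h2) (lt_irrefl j))
      (by push_cast; omega) (by push_cast; omega)
  · rw [aOuter_le_one _ _ _ hp2, bLoop_small _ _ _ (by omega)]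

theorem go_eq (T : List Int) (maxi cnt prod : Int) (h0 : 0 ≤ cnt) (h1 : cnt ≤ maxi) :
    aGo T maxi cnt prod = altGo T maxi cnt prod := by
  induction T generalizing maxi cnt prod with
  | nil => rfl
  | cons x xs ih =>
    simp only [aGo, altGo, arePrimes_eq]
    split
    · rw [ih (max maxi (cnt + 1)) (cnt + 1) _ (by omega) (le_max_right _ _)]
      congr 1
      rcases le_or_gt (cnt + 1) maxi with h | h
      · rw [max_eq_left h, if_neg (by omega)]
      · rw [max_eq_right (by omega), if_pos (by omega)]
    · rw [ih _ 0 1 le_rfl (by omega)]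
      congr 1
      omega

-- ===== VERDICT (by name: the statement is the Claim_ definition above) =====
theorem spojny_spec : Claim_equal_spojny := by
  intro T _
  unfold Spec_spojny spojny spojny_alt
  exact go_eq T 0 0 1 le_rfl le_rfl
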